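-- pv_equiv track=rewrite | github.com/Darwin1401/LTTT | baocaodoan.py | is_left_linear_grammar
-- ===== SOURCE A (Python) =====
-- def is_left_linear_grammar(Variables, Production): # Kiem tra tuyen tinh trai
--     for item in Production:
--         for value in item.values():
--             if value != "Epsilon":
--                 for i in value:
--                     if i in Variables:
--                         if value[0] != i or i in value[1:]:
--                             return False
--     return True
-- ===== SOURCE B (Python) =====
-- def is_left_linear_grammar(Variables, Production):
--     # A body is left-linear exactly when no grammar variable occurs after position 0,
--     # so one membership pass over value[1:] suffices.
--     vset = set(Variables)
--     return all(c not in vset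
--                for item in Production
--                for value in item.values()
--                if value != "Epsilon"
--                for c in value[1:])
-- ===== Notes on version B (the rewrite author's own statement) =====
-- stated objective: faster
-- what changed: Replaces A's nested imperative loops with a compound per-character test (value[0]!=i or i in value[1:], re-scanning the value tail and the Variables list for every character) by a single declarative all() over only value[1:] against a precomputed set of variables, using the fact that a body is left-linear exactly when no variable occurs after position 0.
import Mathlib
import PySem

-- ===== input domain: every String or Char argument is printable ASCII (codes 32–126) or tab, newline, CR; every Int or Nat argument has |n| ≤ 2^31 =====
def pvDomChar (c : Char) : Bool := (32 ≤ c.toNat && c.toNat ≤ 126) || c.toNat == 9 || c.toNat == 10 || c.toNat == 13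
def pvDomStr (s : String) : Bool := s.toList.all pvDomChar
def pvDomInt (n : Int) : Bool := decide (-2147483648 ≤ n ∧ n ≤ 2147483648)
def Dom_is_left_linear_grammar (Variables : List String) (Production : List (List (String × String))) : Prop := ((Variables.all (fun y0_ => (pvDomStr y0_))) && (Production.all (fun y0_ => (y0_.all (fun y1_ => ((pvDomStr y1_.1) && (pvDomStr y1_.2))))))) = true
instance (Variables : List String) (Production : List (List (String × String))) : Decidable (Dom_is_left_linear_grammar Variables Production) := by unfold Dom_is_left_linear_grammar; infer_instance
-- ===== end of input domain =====

-- ===== PORT A =====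
-- A, literally: for each item, for each value, if value != "Epsilon", for each char i of value,
-- if i (a one-char string) is in Variables and (value[0] != i or i in value[1:]), return False.
-- Exact notes: 'i in Variables' is one-char-string membership, ported as Variables.contains (String.ofList [i]);
-- 'value[0] != i' compares one-char strings, ported as head? comparison on value's chars (the loop body
-- only runs when value is nonempty, so value[0] never raises); 'i in value[1:]' is one-char substring
-- membership, which is exactly char membership in the tail of value's chars.
def pvA_charLoop (Variables : List String) (vcs : List Char) : List Char → Bool
  | [] => true
  | i :: rest =>
    if Variables.contains (String.ofList [i]) then
      if (vcs.head? != some i) || (vcs.drop 1).contains i then false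
      else pvA_charLoop Variables vcs rest
    else pvA_charLoop Variables vcs rest

def pvA_valLoop (Variables : List String) : List String → Bool
  | [] => true
  | v :: rest =>
    if v != "Epsilon" then
      if pvA_charLoop Variables v.toList v.toList then pvA_valLoop Variables rest else false
    else pvA_valLoop Variables rest

def pvA_itemLoop (Variables : List String) : List (List (String × String)) → Bool
  | [] => true
  | item :: rest =>
    if pvA_valLoop Variables (PySem.Dict.values (PySem.Dict.mk item)) then pvA_itemLoop Variables rest
    else false

def is_left_linear_grammar (Variables : List String) (Production : List (List (String × String))) : Bool :=
  pvA_itemLoop Variables Production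

-- ===== PORT B =====
-- B: build set(Variables) once; the grammar is left-linear iff no character of any value[1:]
-- (values != "Epsilon") is a variable — one all() pass, ported as nested List.all.
def is_left_linear_grammar_alt (Variables : List String) (Production : List (List (String × String))) : Bool :=
  let vset : PySem.Set String := PySem.Set.ofList Variables
  Production.all (fun item =>
    (PySem.Dict.values (PySem.Dict.mk item)).all (fun value =>
      value == "Epsilon" ||
      (value.toList.drop 1).all (fun c => !(PySem.Set.contains vset (String.ofList [c])))))

-- ===== PRECONDITION & SPEC =====
def Spec_is_left_linear_grammar (Variables : List String) (Production : List (List (String × String))) (out : Bool) : Prop := out = is_left_linear_grammar_alt Variables Production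
instance (Variables : List String) (Production : List (List (String × String))) (out : Bool) : Decidable (Spec_is_left_linear_grammar Variables Production out) := by unfold Spec_is_left_linear_grammar; infer_instance

-- ===== CLAIM (what is proved, stated in full; the proofs are below) =====
def Claim_equal_is_left_linear_grammar : Prop := ∀ (Variables : List String) (Production : List (List (String × String))), Dom_is_left_linear_grammar Variables Production → Spec_is_left_linear_grammar Variables Production (is_left_linear_grammar Variables Production)

-- ===== LEMMAS AND PROOFS =====

-- A's inner char loop returns true iff every variable character satisfies the compound test.
theorem pvA_charLoop_iff (Variables : List String) (vcs : List Char) (l : List Char) :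
    pvA_charLoop Variables vcs l = true ↔
      ∀ i ∈ l, String.ofList [i] ∈ Variables → (vcs.head? = some i ∧ i ∉ vcs.drop 1) := by
  induction l with
  | nil => simp [pvA_charLoop]
  | cons i rest ih =>
    simp only [pvA_charLoop]
    by_cases hv : Variables.contains (String.ofList [i])
    · rw [if_pos hv]
      by_cases hc : ((vcs.head? != some i) || (vcs.drop 1).contains i) = true
      · rw [if_pos hc]
        simp only [Bool.or_eq_true, bne_iff_ne, List.contains_iff_mem] at hc
        constructor
        · intro h; exact absurd h (by simp)
        · intro h
          have := h i (by simp) (List.contains_iff_mem.mp hv)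
          rcases hc with hc | hc
          · exact absurd this.1 hc
          · exact absurd hc this.2
      · rw [if_neg hc]
        simp only [Bool.or_eq_true, bne_iff_ne, List.contains_iff_mem, not_or, not_not] at hc
        rw [ih]
        constructor
        · intro h j hj hjv
          rcases List.mem_cons.mp hj with rfl | hj
          · exact ⟨hc.1, hc.2⟩
          · exact h j hj hjv
        · intro h j hj hjv; exact h j (List.mem_cons_of_mem _ hj) hjv
    · rw [if_neg hv, ih]
      have hv' : String.ofList [i] ∉ Variables := fun h => hv (List.contains_iff_mem.mpr h)
      constructor
      · intro h j hj hjv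
        rcases List.mem_cons.mp hj with rfl | hj
        · exact absurd hjv hv'
        · exact h j hj hjv
      · intro h j hj hjv; exact h j (List.mem_cons_of_mem _ hj) hjv

-- Run on all of value's chars, the compound test reduces to: no variable char after position 0.
theorem pvA_charLoop_key (Variables : List String) (vcs : List Char) :
    pvA_charLoop Variables vcs vcs = true ↔
      ∀ c ∈ vcs.drop 1, String.ofList [c] ∉ Variables := by
  rw [pvA_charLoop_iff]
  cases vcs with
  | nil => simp
  | cons h t =>
    simp only [List.drop_succ_cons, List.drop_zero, List.head?_cons]
    constructor
    · intro hyp c hc hcv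
      have := hyp c (List.mem_cons_of_mem _ hc) hcv
      exact this.2 hc
    · intro hyp i hi hiv
      rcases List.mem_cons.mp hi with rfl | hi
      · refine ⟨rfl, fun hmem => hyp i hmem hiv⟩
      · exact absurd hiv (hyp i hi)

theorem pvA_valLoop_iff (Variables : List String) (vs : List String) :
    pvA_valLoop Variables vs = true ↔
      ∀ v ∈ vs, v ≠ "Epsilon" → ∀ c ∈ v.toList.drop 1, String.ofList [c] ∉ Variables := by
  induction vs with
  | nil => simp [pvA_valLoop]
  | cons v rest ih =>
    simp only [pvA_valLoop]
    by_cases he : v = "Epsilon"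
    · subst he
      rw [if_neg (by simp), ih]
      constructor
      · intro h w hw hne
        rcases List.mem_cons.mp hw with rfl | hw
        · exact absurd rfl hne
        · exact h w hw hne
      · intro h w hw; exact h w (List.mem_cons_of_mem _ hw)
    · rw [if_pos (by simp [he])]
      by_cases hch : pvA_charLoop Variables v.toList v.toList = true
      · rw [if_pos hch, ih]
        have hv := (pvA_charLoop_key Variables v.toList).mp hch
        constructor
        · intro h w hw hne
          rcases List.mem_cons.mp hw with rfl | hw
          · exact fun c hc => hv c hc
          · exact h w hw hne
        · intro h w hw; exact h w (List.mem_cons_of_mem _ hw)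
      · rw [if_neg hch]
        constructor
        · intro h'; exact absurd h' (by simp)
        · intro hyp
          exact absurd ((pvA_charLoop_key Variables v.toList).mpr
            (hyp v List.mem_cons_self he)) hch

theorem pvA_itemLoop_iff (Variables : List String) (Production : List (List (String × String))) :
    pvA_itemLoop Variables Production = true ↔
      ∀ item ∈ Production, ∀ v ∈ PySem.Dict.values (PySem.Dict.mk item),
        v ≠ "Epsilon" → ∀ c ∈ v.toList.drop 1, String.ofList [c] ∉ Variables := by
  induction Production with
  | nil => simp [pvA_itemLoop]
  | cons item rest ih =>
    simp only [pvA_itemLoop]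
    by_cases h : pvA_valLoop Variables (PySem.Dict.values (PySem.Dict.mk item)) = true
    · rw [if_pos h, ih]
      have hv := (pvA_valLoop_iff Variables _).mp h
      constructor
      · intro hr it hit
        rcases List.mem_cons.mp hit with rfl | hit
        · exact hv
        · exact hr it hit
      · intro hr it hit; exact hr it (List.mem_cons_of_mem _ hit)
    · rw [if_neg h]
      constructor
      · intro h'; exact absurd h' (by simp)
      · intro hyp
        exact absurd ((pvA_valLoop_iff Variables _).mpr
          (fun v hv hne c hc => hyp item List.mem_cons_self v hv hne c hc)) h

theorem alt_iff (Variables : List String) (Production : List (List (String × String))) :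
    is_left_linear_grammar_alt Variables Production = true ↔
      ∀ item ∈ Production, ∀ v ∈ PySem.Dict.values (PySem.Dict.mk item),
        v ≠ "Epsilon" → ∀ c ∈ v.toList.drop 1, String.ofList [c] ∉ Variables := by
  have hset : ∀ x : String, ((PySem.Set.ofList Variables).contains x = false) ↔ x ∉ Variables := by
    intro x
    rw [← Bool.not_eq_true, PySem.Set.contains_iff, PySem.Set.mem_ofList]
  simp only [is_left_linear_grammar_alt, List.all_eq_true, Bool.or_eq_true, beq_iff_eq,
    Bool.not_eq_eq_eq_not, Bool.not_true]
  constructor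
  · intro h item hit v hv hne c hc
    rcases h item hit v hv with h' | h'
    · exact absurd h' hne
    · exact (hset _).mp (h' c hc)
  · intro h item hit v hv
    by_cases he : v = "Epsilon"
    · exact Or.inl he
    · exact Or.inr (fun c hc => (hset _).mpr (h item hit v hv he c hc))

-- ===== VERDICT (by name: the statement is the Claim_ definition above) =====
theorem is_left_linear_grammar_spec : Claim_equal_is_left_linear_grammar := by
  intro Variables Production _
  unfold Spec_is_left_linear_grammar is_left_linear_grammar
  rw [Bool.eq_iff_iff, pvA_itemLoop_iff, alt_iff]
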